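-- pv_equiv track=rewrite | github.com/ModelChecker/moxi-utilities | tools/parse_table.py | find_base
-- ===== SOURCE A (Python) =====
-- from typing import Optional, NewType, cast
--
-- State = NewType("State", str)
--
-- Token = NewType("Token", str)
--
-- def find_base(
--     edges: list[Token],
--     check: dict[int, State],
--     tokens: list[Token],
-- ) -> int:
--     """Given a state with a set of outgoing edges with labels in `edges`, returns the lowest index `i` such that for all `t` in `edges`, `check[i+t]` is empty."""
--     i = 0
--     while any([(tokens.index(tok) + i in check) for tok in edges]):
--         i += 1
--     return i
-- ===== SOURCE B (Python) =====
-- def find_base(edges, check, tokens):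
--     pos = {}
--     for idx, tok in enumerate(tokens):
--         if tok not in pos:
--             pos[tok] = idx
--     offsets = {pos[tok] for tok in edges}
--     forbidden = {k - off for k in check for off in offsets}
--     m = len(forbidden)
--     for i in range(m):
--         if i not in forbidden:
--             return i
--     return m
-- ===== Notes on version B (the rewrite author's own statement) =====
-- stated objective: alternative
-- what changed: Replaces the while-loop that re-runs tokens.index over all edges for every candidate i with a one-shot precomputation: a first-occurrence position map, the set of edge offsets, and the forbidden set {k - off}, then a single linear scan for the smallest free slot.
import Mathlib
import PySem

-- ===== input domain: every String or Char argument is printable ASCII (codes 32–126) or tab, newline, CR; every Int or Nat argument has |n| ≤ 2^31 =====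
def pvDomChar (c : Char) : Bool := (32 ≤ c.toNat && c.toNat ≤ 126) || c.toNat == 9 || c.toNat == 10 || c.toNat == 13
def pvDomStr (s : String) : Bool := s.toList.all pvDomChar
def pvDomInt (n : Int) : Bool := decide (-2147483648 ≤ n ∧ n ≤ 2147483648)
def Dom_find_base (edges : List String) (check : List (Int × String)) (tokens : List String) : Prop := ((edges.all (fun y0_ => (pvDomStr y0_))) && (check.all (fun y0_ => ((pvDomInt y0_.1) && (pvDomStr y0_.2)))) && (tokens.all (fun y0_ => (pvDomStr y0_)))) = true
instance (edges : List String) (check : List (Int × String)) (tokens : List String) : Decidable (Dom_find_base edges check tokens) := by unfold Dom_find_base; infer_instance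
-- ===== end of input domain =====

-- B precomputes the forbidden-offset set once and scans for the first free slot; A rescans
-- tokens.index over all edges for every candidate i.

-- ===== PORT A =====
-- `key in check` (dict membership) on the association list: any pair with that key.
def pvCheckMem (check : List (Int × String)) (k : Int) : Bool :=
  check.any (fun kv => kv.1 == k)

-- the while-condition: any([(tokens.index(tok) + i in check) for tok in edges])
def pvCondA (edges : List String) (check : List (Int × String)) (tokens : List String) (i : Int) : Bool :=
  (edges.map (fun tok =>
    pvCheckMem check ((((PySem.List.index? tokens tok).getD 0 : Nat) : Int) + i))).any id

-- the while-loop; fuel |check|*|edges|+1 always suffices (at most |check|*|edges| values of i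
-- can make the condition true), so the loop is a faithful transliteration.
def pvLoopA (edges : List String) (check : List (Int × String)) (tokens : List String) (i : Int) : Nat → Int
  | 0 => i
  | fuel + 1 => if pvCondA edges check tokens i then pvLoopA edges check tokens (i + 1) fuel else i

def find_base (edges : List String) (check : List (Int × String)) (tokens : List String) : Int :=
  pvLoopA edges check tokens 0 (check.length * edges.length + 1)

-- ===== PORT B =====
-- pos = first-occurrence index of each token (dict built over enumerate(tokens))
def pvPos (tokens : List String) : PySem.Dict String Int :=
  (PySem.List.enumerate tokens).foldl
    (fun d p => if d.contains p.2 then d else d.insert p.2 p.1) PySem.Dict.empty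

-- offsets = {pos[tok] for tok in edges}
def pvOffsets (edges tokens : List String) : PySem.Set Int :=
  PySem.Set.ofList (edges.map (fun tok => (pvPos tokens).getD tok 0))

-- forbidden = {k - off for k in check for off in offsets}
def pvForbidden (edges : List String) (check : List (Int × String)) (tokens : List String) : PySem.Set Int :=
  PySem.Set.ofList ((check.map Prod.fst).flatMap (fun k =>
    (pvOffsets edges tokens).map (fun off => k - off)))

-- for i in range(m): if i not in forbidden: return i / else return m
def pvScanB (forbidden : List Int) (m : Int) : List Int → Int
  | [] => m
  | i :: rest => if PySem.Set.contains forbidden i then pvScanB forbidden m rest else i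

def find_base_alt (edges : List String) (check : List (Int × String)) (tokens : List String) : Int :=
  let forbidden := pvForbidden edges check tokens
  let m : Int := PySem.Set.len forbidden
  pvScanB forbidden m (PySem.List.pyRange 0 m 1)

-- ===== PRECONDITION & SPEC =====
-- Pre_ excludes inputs where some edge label does not occur in tokens: there A raises
-- ValueError (tokens.index) and B raises KeyError (pos[tok]).
def Pre_find_base (edges : List String) (check : List (Int × String)) (tokens : List String) : Prop :=
  ∀ tok ∈ edges, tok ∈ tokens
instance (edges : List String) (check : List (Int × String)) (tokens : List String) : Decidable (Pre_find_base edges check tokens) := by unfold Pre_find_base; infer_instance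

def pvWitness_find_base : List String × (List (Int × String)) × List String :=
  (["a", "b"], [(1, "s"), (2, "t")], ["b", "a"])

def Spec_find_base (edges : List String) (check : List (Int × String)) (tokens : List String) (out : Int) : Prop := out = find_base_alt edges check tokens
instance (edges : List String) (check : List (Int × String)) (tokens : List String) (out : Int) : Decidable (Spec_find_base edges check tokens out) := by unfold Spec_find_base; infer_instance

-- ===== CLAIM (what is proved, stated in full; the proofs are below) =====
def Claim_equal_find_base : Prop := ∀ (edges : List String) (check : List (Int × String)) (tokens : List String), Dom_find_base edges check tokens → Pre_find_base edges check tokens → Spec_find_base edges check tokens (find_base edges check tokens)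

-- ===== LEMMAS AND PROOFS =====

-- the dict built by pvPos records the FIRST occurrence index of each token
theorem pvPosFold_get? (xs : List String) : ∀ (s : Int) (d : PySem.Dict String Int) (t : String),
    ((PySem.List.enumerate xs s).foldl
      (fun d p => if d.contains p.2 then d else d.insert p.2 p.1) d).get? t
    = if d.contains t then d.get? t
      else Option.map (fun n : Nat => s + (n : Int)) (PySem.List.index? xs t) := by
  induction xs with
  | nil =>
    intro s d t
    rw [PySem.List.enumerate_nil]
    simp only [List.foldl_nil]
    by_cases h : d.contains t = true
    · simp [h]
    · have h' : d.contains t = false := by simpa using h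
      have hidx : PySem.List.index? ([] : List String) t = none := by
        rw [PySem.List.index?_eq_idxOf?]; simp
      rw [hidx]
      simp only [h', Bool.false_eq_true, if_false, Option.map_none]
      exact (PySem.Dict.get?_eq_none_iff_contains d t).mpr h'
  | cons x xs ih =>
    intro s d t
    rw [PySem.List.enumerate_cons]
    simp only [List.foldl_cons]
    by_cases hc : d.contains x = true
    · simp only [hc, if_true]
      rw [ih (s+1) d t]
      by_cases ht : d.contains t = true
      · simp [ht]
      · have hxt : x ≠ t := by rintro rfl; exact ht hc
        simp only [ht, Bool.false_eq_true, if_false]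
        rw [PySem.List.index?_cons_of_ne xs hxt]
        cases PySem.List.index? xs t with
        | none => simp
        | some n => simp; ring
    · simp only [hc, Bool.false_eq_true, if_false]
      rw [ih (s+1) (d.insert x s) t]
      by_cases hxt : x = t
      · subst hxt
        have hct : d.contains x = false := by simpa using hc
        rw [PySem.Dict.contains_insert_self]
        simp only [if_true]
        rw [PySem.Dict.get?_insert_self, hct]
        rw [PySem.List.index?_cons_self]
        simp
      · have h1 : (d.insert x s).contains t = d.contains t := by
          rw [PySem.Dict.contains_insert]
          have : (t == x) = false := by simpa using Ne.symm hxt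
          simp [this]
        have h2 : (d.insert x s).get? t = d.get? t :=
          PySem.Dict.get?_insert_of_ne d s (Ne.symm hxt)
        rw [h1, h2, PySem.List.index?_cons_of_ne xs hxt]
        by_cases ht : d.contains t = true
        · simp [ht]
        · simp only [ht, Bool.false_eq_true, if_false]
          cases PySem.List.index? xs t with
          | none => simp
          | some n => simp; ring

theorem pvPos_getD_of_mem (tokens : List String) (t : String) (h : t ∈ tokens) :
    (pvPos tokens).getD t 0 = (((PySem.List.index? tokens t).getD 0 : Nat) : Int) := by
  have hg := pvPosFold_get? tokens 0 PySem.Dict.empty t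
  rw [PySem.Dict.contains_empty] at hg
  simp only [Bool.false_eq_true, if_false] at hg
  obtain ⟨n, hn⟩ := Option.isSome_iff_exists.mp ((PySem.List.index?_isSome_iff tokens t).mpr h)
  unfold pvPos PySem.Dict.getD
  rw [hg, hn]
  simp

-- membership in B's forbidden set is exactly A's while-condition
theorem mem_forbidden_iff (edges : List String) (check : List (Int × String)) (tokens : List String)
    (hpre : Pre_find_base edges check tokens) (i : Int) :
    i ∈ pvForbidden edges check tokens ↔ pvCondA edges check tokens i = true := by
  unfold pvForbidden pvOffsets pvCondA pvCheckMem
  rw [PySem.Set.mem_ofList]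
  simp only [List.any_map, Function.comp, id, List.any_eq_true, List.mem_flatMap,
    List.mem_map, PySem.Set.mem_ofList, beq_iff_eq]
  constructor
  · rintro ⟨k, ⟨kv, hkv, rfl⟩, b, ⟨tok, htok, rfl⟩, heq⟩
    refine ⟨tok, htok, kv, hkv, ?_⟩
    rw [pvPos_getD_of_mem tokens tok (hpre tok htok)] at heq
    omega
  · rintro ⟨tok, htok, kv, hkv, heq⟩
    refine ⟨kv.1, ⟨kv, hkv, rfl⟩, (pvPos tokens).getD tok 0, ⟨tok, htok, rfl⟩, ?_⟩
    rw [pvPos_getD_of_mem tokens tok (hpre tok htok)]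
    omega

theorem sum_map_le_nat {α : Type} (l : List α) (f : α → Nat) (E : Nat)
    (h : ∀ x ∈ l, f x ≤ E) : (l.map f).sum ≤ l.length * E := by
  induction l with
  | nil => simp
  | cons x xs ih =>
    simp only [List.map_cons, List.sum_cons, List.length_cons]
    have h1 := ih (fun y hy => h y (List.mem_cons_of_mem _ hy))
    have h2 := h x List.mem_cons_self
    nlinarith

theorem forbidden_len_le (edges : List String) (check : List (Int × String)) (tokens : List String) :
    (pvForbidden edges check tokens).length ≤ check.length * edges.length := by
  unfold pvForbidden
  calc (PySem.Set.ofList ((check.map Prod.fst).flatMap (fun k =>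
          (pvOffsets edges tokens).map (fun off => k - off)))).length
      ≤ ((check.map Prod.fst).flatMap (fun k =>
          (pvOffsets edges tokens).map (fun off => k - off))).length :=
        PySem.Set.length_ofList_le _
    _ ≤ check.length * edges.length := by
        rw [List.length_flatMap]
        have h1 : (pvOffsets edges tokens).length ≤ edges.length := by
          unfold pvOffsets
          calc (PySem.Set.ofList (edges.map fun tok => (pvPos tokens).getD tok 0)).length
              ≤ (edges.map fun tok => (pvPos tokens).getD tok 0).length :=
                PySem.Set.length_ofList_le _
            _ = edges.length := List.length_map ..
        have h2 := sum_map_le_nat (check.map Prod.fst)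
          (fun k => ((pvOffsets edges tokens).map (fun off => k - off)).length) edges.length
          (fun k _ => by simpa using h1)
        simpa using h2

-- pigeonhole: a duplicate-free list of ints misses some j in {0,…,len}
theorem exists_free_le (S : List Int) (hS : S.Nodup) :
    ∃ j : Nat, j ≤ S.length ∧ (j : Int) ∉ S := by
  by_contra hcon
  push_neg at hcon
  have hsub : ((List.range (S.length + 1)).map (fun j : Nat => (j : Int))) ⊆ S := by
    intro y hy
    simp only [List.mem_map, List.mem_range] at hy
    obtain ⟨j, hj, rfl⟩ := hy
    exact hcon j (Nat.lt_succ_iff.mp hj)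
  have hnd : ((List.range (S.length + 1)).map (fun j : Nat => (j : Int))).Nodup :=
    (List.nodup_range).map (fun a b h => by exact_mod_cast h)
  have hcard := (hnd.subperm hsub).length_le
  simp at hcard

-- pigeonhole: if all of 0..len-1 occur, len itself does not
theorem not_mem_of_all_below (S : List Int) (hS : S.Nodup)
    (h : ∀ j : Nat, j < S.length → (j : Int) ∈ S) : ((S.length : Int) ∉ S) := by
  have hsub : ((List.range S.length).map (fun j : Nat => (j : Int))) ⊆ S := by
    intro y hy
    simp only [List.mem_map, List.mem_range] at hy
    obtain ⟨j, hj, rfl⟩ := hy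
    exact h j hj
  have hnd : ((List.range S.length).map (fun j : Nat => (j : Int))).Nodup :=
    (List.nodup_range).map (fun a b h => by exact_mod_cast h)
  have hperm : ((List.range S.length).map (fun j : Nat => (j : Int))).Perm S :=
    (hnd.subperm hsub).perm_of_length_le (by simp)
  intro hmem
  have hmem' : (S.length : Int) ∈ ((List.range S.length).map (fun j : Nat => (j : Int))) :=
    hperm.mem_iff.mpr hmem
  simp only [List.mem_map, List.mem_range] at hmem'
  obtain ⟨j, hj, hje⟩ := hmem'
  omega

-- A's loop returns the least i in its window with a false condition
theorem loopA_spec (edges : List String) (check : List (Int × String)) (tokens : List String) :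
    ∀ (fuel : Nat) (i : Int),
    (∃ j : Int, i ≤ j ∧ j < i + fuel ∧ pvCondA edges check tokens j = false) →
    pvCondA edges check tokens (pvLoopA edges check tokens i fuel) = false ∧
    i ≤ pvLoopA edges check tokens i fuel ∧
    ∀ j, i ≤ j → j < pvLoopA edges check tokens i fuel → pvCondA edges check tokens j = true := by
  intro fuel
  induction fuel with
  | zero =>
    rintro i ⟨j, h1, h2, _⟩
    exfalso
    simp only [Nat.cast_zero, add_zero] at h2
    omega
  | succ n ih =>
    rintro i ⟨j, h1, h2, h3⟩
    by_cases hc : pvCondA edges check tokens i = true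
    · have hji : i ≠ j := by rintro rfl; rw [hc] at h3; cases h3
      have hrec := ih (i + 1) ⟨j, by omega, by push_cast at h2 ⊢; omega, h3⟩
      refine ⟨?_, ?_, ?_⟩
      · simpa [pvLoopA, hc] using hrec.1
      · have := hrec.2.1; simp only [pvLoopA, hc, if_true]; omega
      · intro k hk1 hk2
        simp only [pvLoopA, hc, if_true] at hk2
        by_cases hik : k = i
        · subst hik; exact hc
        · exact hrec.2.2 k (by omega) hk2
    · have hc' : pvCondA edges check tokens i = false := by simpa using hc
      refine ⟨by simpa [pvLoopA, hc'], by simp [pvLoopA, hc'], ?_⟩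
      intro k hk1 hk2
      simp only [pvLoopA, hc', Bool.false_eq_true, if_false] at hk2
      exfalso; omega

-- B's scan returns the least nonnegative i not in forbidden
theorem scanB_spec (forbidden : List Int) (m : Int)
    (hm : m = (forbidden.length : Int)) (hnd : forbidden.Nodup) :
    ∀ (n : Nat) (a : Int), 0 ≤ a → a ≤ m → (m - a).toNat = n →
    (∀ j, 0 ≤ j → j < a → j ∈ forbidden) →
    (pvScanB forbidden m (PySem.List.pyRange a m 1) ∉ forbidden ∧
     0 ≤ pvScanB forbidden m (PySem.List.pyRange a m 1) ∧
     ∀ j, 0 ≤ j → j < pvScanB forbidden m (PySem.List.pyRange a m 1) → j ∈ forbidden) := by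
  intro n
  induction n with
  | zero =>
    intro a h0 ham hn hbelow
    have ha : a = m := by omega
    subst ha
    rw [PySem.List.pyRange_one_eq_nil le_rfl]
    simp only [pvScanB]
    have hnotmem : a ∉ forbidden := by
      rw [hm]
      apply not_mem_of_all_below forbidden hnd
      intro j hj
      exact hbelow j (by omega) (by rw [hm]; exact_mod_cast hj)
    exact ⟨hnotmem, by omega, fun j hj1 hj2 => hbelow j hj1 hj2⟩
  | succ n ih =>
    intro a h0 ham hn hbelow
    have ha : a < m := by omega
    rw [PySem.List.pyRange_one_cons ha]
    simp only [pvScanB]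
    by_cases hc : PySem.Set.contains forbidden a = true
    · have hmem : a ∈ forbidden := (PySem.Set.contains_iff forbidden a).mp hc
      simp only [hc, if_true]
      exact ih (a + 1) (by omega) (by omega) (by omega)
        (fun j hj1 hj2 => by
          by_cases hja : j = a
          · subst hja; exact hmem
          · exact hbelow j hj1 (by omega))
    · have hnmem : a ∉ forbidden := fun hmem =>
        hc ((PySem.Set.contains_iff forbidden a).mpr hmem)
      simp only [hc, Bool.false_eq_true, if_false]
      exact ⟨hnmem, h0, fun j hj1 hj2 => hbelow j hj1 hj2⟩

-- ===== VERDICT (by name: the statement is the Claim_ definition above) =====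
theorem find_base_spec : Claim_equal_find_base := by
  intro edges check tokens _hdom hpre
  unfold Spec_find_base
  have hnd : (pvForbidden edges check tokens).Nodup := PySem.Set.nodup_ofList _
  have hiff : ∀ i : Int, i ∈ pvForbidden edges check tokens ↔ pvCondA edges check tokens i = true :=
    mem_forbidden_iff edges check tokens hpre
  -- A's result is the least i ≥ 0 with the condition false
  obtain ⟨j, hjle, hjnot⟩ := exists_free_le (pvForbidden edges check tokens) hnd
  have hlen := forbidden_len_le edges check tokens
  have hA := loopA_spec edges check tokens (check.length * edges.length + 1) 0
    ⟨(j : Int), by omega, by push_cast; omega, by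
      rw [← Bool.not_eq_true]
      intro hcon
      exact hjnot ((hiff _).mpr hcon)⟩
  -- B's result is the least i ≥ 0 not in forbidden
  have hB := scanB_spec (pvForbidden edges check tokens)
    (PySem.Set.len (pvForbidden edges check tokens)) rfl hnd
    ((PySem.Set.len (pvForbidden edges check tokens)) - 0).toNat 0 le_rfl
    (by unfold PySem.Set.len; omega) rfl (by intro j h1 h2; omega)
  have hAr : find_base edges check tokens =
      pvLoopA edges check tokens 0 (check.length * edges.length + 1) := rfl
  have hBr : find_base_alt edges check tokens =
      pvScanB (pvForbidden edges check tokens)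
        (PySem.Set.len (pvForbidden edges check tokens))
        (PySem.List.pyRange 0 (PySem.Set.len (pvForbidden edges check tokens)) 1) := rfl
  rw [hAr, hBr]
  set rA := pvLoopA edges check tokens 0 (check.length * edges.length + 1) with hra
  set rB := pvScanB (pvForbidden edges check tokens)
    (PySem.Set.len (pvForbidden edges check tokens))
    (PySem.List.pyRange 0 (PySem.Set.len (pvForbidden edges check tokens)) 1) with hrb
  rcases lt_trichotomy rA rB with h | h | h
  · exfalso
    have hmem : rA ∈ pvForbidden edges check tokens := hB.2.2 rA hA.2.1 h
    rw [hiff rA, hA.1] at hmem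
    cases hmem
  · exact h
  · exfalso
    have hcond : pvCondA edges check tokens rB = true := hA.2.2 rB hB.2.1 h
    exact hB.1 ((hiff rB).mpr hcond)
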